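-- pv_equiv track=rewrite | github.com/zachatkinson/bf1942-portal-conversion | tools/analyze_bf6_assets.py | find_gameplay_objects
-- ===== SOURCE A (Python) =====
-- from typing import Dict, List
--
-- def find_gameplay_objects(assets: List[Dict]) -> List[Dict]:
--     """Find gameplay-related objects (HQs, spawners, capture points).
--
--     Args:
--         assets: List of asset dictionaries
--
--     Returns:
--         List of gameplay assets
--     """
--     gameplay = []
--     keywords = [
--         "hq",
--         "headquarters",
--         "spawner",
--         "spawnpoint",
--         "capturepoint",
--         "capture",
--         "objective",
--         "combatarea",
--         "areaTrigger",
--         "trigger",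
--     ]
--
--     for asset in assets:
--         asset_type = asset.get("type", "").lower()
--         directory = asset.get("directory", "").lower()
--
--         if any(keyword in asset_type for keyword in keywords) or "gameplay" in directory:
--             gameplay.append(asset)
--
--     return gameplay
-- ===== SOURCE B (Python) =====
-- from typing import Dict, List
--
-- # Inverted search: instead of running a substring scan per keyword, walk the
-- # text positions once and test the slice of each keyword length for membership
-- # in a precomputed hash set of keywords.
-- _KEYWORDS = frozenset([
--     "hq",
--     "headquarters",
--     "spawner",
--     "spawnpoint",
--     "capturepoint",
--     "capture",
--     "objective",
--     "combatarea",
--     "areaTrigger",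
--     "trigger",
-- ])
-- _LENGTHS = tuple(sorted({len(k) for k in _KEYWORDS}))
--
-- _GAMEPLAY = frozenset(["gameplay"])
-- _GAMEPLAY_LENGTHS = (8,)
--
--
-- def _contains_any(text, patterns, lengths):
--     """True iff some slice of text of one of the given lengths is in patterns."""
--     for i in range(len(text)):
--         for n in lengths:
--             if text[i:i + n] in patterns:
--                 return True
--     return False
--
--
-- def find_gameplay_objects(assets: List[Dict]) -> List[Dict]:
--     """Find gameplay-related objects (HQs, spawners, capture points)."""
--     return [
--         asset
--         for asset in assets
--         if _contains_any(asset.get("type", "").lower(), _KEYWORDS, _LENGTHS)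
--         or _contains_any(asset.get("directory", "").lower(), _GAMEPLAY, _GAMEPLAY_LENGTHS)
--     ]
-- ===== Notes on version B (the rewrite author's own statement) =====
-- stated objective: alternative
-- what changed: B inverts the search: instead of A's any()-scan over the ten keywords each running its own substring search, B walks the text positions once and tests the slice of each distinct keyword length for membership in a precomputed frozenset of keywords (set-of-substrings matching), combined with a list comprehension instead of A's accumulator loop.
import Mathlib
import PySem

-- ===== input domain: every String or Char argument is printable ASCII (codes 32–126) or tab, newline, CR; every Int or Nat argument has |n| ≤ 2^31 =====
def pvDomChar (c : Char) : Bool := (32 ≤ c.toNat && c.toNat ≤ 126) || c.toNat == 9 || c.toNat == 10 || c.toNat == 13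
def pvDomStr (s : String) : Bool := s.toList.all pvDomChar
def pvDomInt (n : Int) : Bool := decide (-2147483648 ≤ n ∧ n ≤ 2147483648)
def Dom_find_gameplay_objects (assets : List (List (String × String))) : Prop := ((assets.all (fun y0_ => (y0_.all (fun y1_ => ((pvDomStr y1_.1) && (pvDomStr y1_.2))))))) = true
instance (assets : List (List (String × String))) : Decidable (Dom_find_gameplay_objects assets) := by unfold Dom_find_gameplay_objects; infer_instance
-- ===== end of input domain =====

-- B inverts the search: instead of a substring scan per keyword, it walks the
-- text positions once and tests the slice of each keyword length for membership
-- in a precomputed keyword set (alternative algorithm; same return value).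


-- ===== PORT A =====
def find_gameplay_objects (assets : List (List (String × String))) : List (List (String × String)) :=
  let gameplay : List (List (String × String)) := []
  let keywords : List String :=
    ["hq", "headquarters", "spawner", "spawnpoint", "capturepoint",
     "capture", "objective", "combatarea", "areaTrigger", "trigger"]
  let gameplay := assets.foldl (fun gameplay asset =>
    let asset_type := PySem.Str.lower ((PySem.Dict.mk asset).getD "type" "")
    let directory := PySem.Str.lower ((PySem.Dict.mk asset).getD "directory" "")
    if (keywords.any fun keyword => PySem.Str.isIn keyword asset_type)
        || PySem.Str.isIn "gameplay" directory
    then gameplay ++ [asset] else gameplay) gameplay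
  gameplay

-- ===== PORT B =====
-- the frozenset of keywords (distinct literals) and the sorted distinct lengths
def pvKeywords : List String :=
  ["hq", "headquarters", "spawner", "spawnpoint", "capturepoint",
   "capture", "objective", "combatarea", "areaTrigger", "trigger"]
def pvLengths : List Int := [2, 7, 9, 10, 11, 12]
def pvGameplaySet : List String := ["gameplay"]
def pvGameplayLengths : List Int := [8]

-- `any` over positions/lengths ports the early-returning double for loop
def pvContainsAny (text : String) (patterns : List String) (lengths : List Int) : Bool :=
  (PySem.List.pyRange 0 (PySem.Str.len text) 1).any fun i =>
    lengths.any fun n => patterns.contains (PySem.Str.slice text (some i) (some (i + n)))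

def find_gameplay_objects_alt (assets : List (List (String × String))) : List (List (String × String)) :=
  assets.filter fun asset =>
    pvContainsAny (PySem.Str.lower ((PySem.Dict.mk asset).getD "type" "")) pvKeywords pvLengths
      || pvContainsAny (PySem.Str.lower ((PySem.Dict.mk asset).getD "directory" "")) pvGameplaySet pvGameplayLengths

-- ===== PRECONDITION & SPEC =====
def Spec_find_gameplay_objects (assets : List (List (String × String))) (out : List (List (String × String))) : Prop := out = find_gameplay_objects_alt assets
instance (assets : List (List (String × String))) (out : List (List (String × String))) : Decidable (Spec_find_gameplay_objects assets out) := by unfold Spec_find_gameplay_objects; infer_instance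

-- ===== CLAIM (what is proved, stated in full; the proofs are below) =====
def Claim_equal_find_gameplay_objects : Prop := ∀ (assets : List (List (String × String))), Dom_find_gameplay_objects assets → Spec_find_gameplay_objects assets (find_gameplay_objects assets)

-- ===== LEMMAS AND PROOFS =====

-- every keyword is nonempty, its length is positive and listed in the length list
theorem pv_hlen_kw : ∀ kw ∈ pvKeywords, kw.toList ≠ [] ∧ ((kw.toList.length : Int) ∈ pvLengths) := by decide
theorem pv_hpos_kw : ∀ n ∈ pvLengths, (0 : Int) < n := by decide
theorem pv_hlen_gp : ∀ kw ∈ pvGameplaySet, kw.toList ≠ [] ∧ ((kw.toList.length : Int) ∈ pvGameplayLengths) := by decide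
theorem pv_hpos_gp : ∀ n ∈ pvGameplayLengths, (0 : Int) < n := by decide

-- B's position scan finds exactly the patterns that occur as substrings,
-- provided every pattern is nonempty with its length listed, and lengths are positive.
theorem pv_containsAny_eq (patterns : List String) (lengths : List Int)
    (hlen : ∀ kw ∈ patterns, kw.toList ≠ [] ∧ (kw.toList.length : Int) ∈ lengths)
    (hpos : ∀ n ∈ lengths, (0 : Int) < n)
    (text : String) :
    pvContainsAny text patterns lengths = patterns.any fun kw => PySem.Str.isIn kw text := by
  unfold pvContainsAny
  cases hB : patterns.any fun kw => PySem.Str.isIn kw text with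
  | true =>
      rw [List.any_eq_true] at hB
      obtain ⟨kw, hkw, hin⟩ := hB
      rw [PySem.Str.isIn_iff_infix] at hin
      obtain ⟨pre, suf, hsplit⟩ := hin
      obtain ⟨hne, hmem⟩ := hlen kw hkw
      rw [List.any_eq_true]
      refine ⟨(pre.length : Int), ?_, ?_⟩
      · rw [PySem.List.mem_pyRange_one]
        constructor
        · exact_mod_cast Nat.zero_le _
        · have : text.toList.length = pre.length + (kw.toList.length + suf.length) := by
            rw [← hsplit]; simp
          have hk : 0 < kw.toList.length := List.length_pos_of_ne_nil hne
          rw [PySem.Str.len_eq]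
          exact_mod_cast (by omega : pre.length < text.toList.length)
      · rw [List.any_eq_true]
        refine ⟨(kw.toList.length : Int), hmem, ?_⟩
        have hs : PySem.Str.slice text (some (pre.length : Int))
            (some ((pre.length : Int) + (kw.toList.length : Int))) = kw := by
          apply String.toList_injective
          rw [PySem.Str.toList_slice, PySem.Chars.slice_eq_listSlice]
          rw [PySem.List.slice_natCast_add, ← hsplit]
          simp
        rw [hs]
        simp [hkw]
  | false =>
      rw [List.any_eq_false] at hB
      rw [List.any_eq_false]
      intro i hi
      rw [Bool.not_eq_true, List.any_eq_false]
      intro n hn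
      rw [Bool.not_eq_true]
      by_contra hc
      rw [Bool.not_eq_false, List.contains_iff_mem] at hc
      have hB' := hB _ hc
      rw [Bool.not_eq_true, PySem.Str.isIn] at hB'
      rw [PySem.Chars.isIn_eq_false_iff] at hB'
      apply hB'
      rw [PySem.Str.toList_slice, PySem.Chars.slice_eq_listSlice]
      rw [PySem.List.mem_pyRange_one] at hi
      obtain ⟨h0, _⟩ := hi
      have hnpos := hpos n hn
      rw [PySem.List.slice_toNat _ h0 (by omega)]
      exact ((List.take_prefix _ _).isInfix).trans (List.drop_suffix _ _).isInfix

-- per-asset: A's condition equals B's condition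
theorem pv_cond_eq (t d : String) :
    ((pvKeywords.any fun keyword => PySem.Str.isIn keyword t) || PySem.Str.isIn "gameplay" d)
    = (pvContainsAny t pvKeywords pvLengths || pvContainsAny d pvGameplaySet pvGameplayLengths) := by
  rw [pv_containsAny_eq pvKeywords pvLengths pv_hlen_kw pv_hpos_kw t]
  rw [pv_containsAny_eq pvGameplaySet pvGameplayLengths pv_hlen_gp pv_hpos_gp d]
  show (_ || PySem.Str.isIn "gameplay" d) = (_ || List.any ["gameplay"] _)
  rw [List.any_cons, List.any_nil, Bool.or_false]

-- A is the append-if accumulator loop: name its shape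
theorem pv_A_eq (assets : List (List (String × String))) :
    find_gameplay_objects assets
    = assets.foldl (fun gameplay asset =>
        if ((pvKeywords.any fun keyword =>
              PySem.Str.isIn keyword (PySem.Str.lower ((PySem.Dict.mk asset).getD "type" "")))
            || PySem.Str.isIn "gameplay" (PySem.Str.lower ((PySem.Dict.mk asset).getD "directory" "")))
        then gameplay ++ [asset] else gameplay) [] := rfl

-- ===== VERDICT (by name: the statement is the Claim_ definition above) =====
theorem find_gameplay_objects_spec : Claim_equal_find_gameplay_objects := by
  intro assets _
  show find_gameplay_objects assets = find_gameplay_objects_alt assets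
  rw [pv_A_eq, PySem.List.foldl_append_if_eq_filter, List.nil_append]
  unfold find_gameplay_objects_alt
  apply List.filter_congr
  intro asset _
  exact pv_cond_eq _ _
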